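-- pv_equiv track=rewrite | github.com/6uan/tip | Week_2-Unit_2/Standard Problem Set Version 1/problem11.py | schedule_pattern
-- ===== SOURCE A (Python) =====
-- def schedule_pattern(pattern, schedule):
--
--     genres = schedule.split()
--
--     # if lists aren't the same we won't have one-to-one
--     if len(schedule) != len(pattern):
--         return False
--
--     char_to_genre = {}
--
--     for char, genre in zip(pattern, genres):
--         if char in char_to_genre:
--             # if char doesn't equal our prev key-value we don't have a one-to-one
--             if char_to_genre[char] != genre:
--                 return False
--         else:
--             char_to_genre[char] = genre
--
--     return True
-- ===== SOURCE B (Python) =====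
-- def schedule_pattern(pattern, schedule):
--     genres = schedule.split()
--     if len(schedule) != len(pattern):
--         return False
--     pairs = list(zip(pattern, genres))
--     # brute force: the mapping is one-to-one from chars iff no two positions
--     # share a pattern char while disagreeing on the genre
--     return all(c != d or g == h for (c, g) in pairs for (d, h) in pairs)
-- ===== Notes on version B (the rewrite author's own statement) =====
-- stated objective: alternative
-- what changed: Drops the stateful dict single pass with per-element branching and early return; B instead checks the consistency definition directly by a stateless quadratic scan over all pairs of (char, genre) positions.
import Mathlib
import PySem

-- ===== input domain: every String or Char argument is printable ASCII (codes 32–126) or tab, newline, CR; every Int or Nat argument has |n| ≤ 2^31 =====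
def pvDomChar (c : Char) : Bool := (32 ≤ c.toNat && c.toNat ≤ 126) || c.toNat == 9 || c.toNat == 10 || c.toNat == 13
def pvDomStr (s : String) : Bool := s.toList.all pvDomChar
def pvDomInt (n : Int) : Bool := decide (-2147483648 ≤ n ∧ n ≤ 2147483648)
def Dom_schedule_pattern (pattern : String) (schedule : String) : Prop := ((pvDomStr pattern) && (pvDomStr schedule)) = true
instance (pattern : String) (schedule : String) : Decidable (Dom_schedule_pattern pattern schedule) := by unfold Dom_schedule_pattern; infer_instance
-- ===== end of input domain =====

-- B replaces A's stateful dict single pass (per-element branch, early return) by a stateless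
-- quadratic scan checking the consistency definition directly on all pairs of positions (alternative).

-- ===== PORT A =====
-- the for-loop over zip(pattern, genres) with early 'return False';
-- 'char_to_genre[char]' is read as getD (the key is present: the branch is guarded by contains)
def schedulePatternLoopA (d : PySem.Dict Char String) : List (Char × String) → Bool
  | [] => true
  | (c, g) :: rest =>
    if d.contains c then
      if d.getD c "" ≠ g then false else schedulePatternLoopA d rest
    else
      schedulePatternLoopA (d.insert c g) rest

def schedule_pattern (pattern : String) (schedule : String) : Bool :=
  let genres := PySem.Str.split₀ schedule
  if PySem.Str.len schedule ≠ PySem.Str.len pattern then false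
  else schedulePatternLoopA PySem.Dict.empty (pattern.toList.zip genres)

-- ===== PORT B =====
def schedule_pattern_alt (pattern : String) (schedule : String) : Bool :=
  let genres := PySem.Str.split₀ schedule
  if PySem.Str.len schedule ≠ PySem.Str.len pattern then false
  else
    let pairs := pattern.toList.zip genres
    pairs.all (fun p => pairs.all (fun q => p.1 != q.1 || p.2 == q.2))

-- ===== PRECONDITION & SPEC =====
def Spec_schedule_pattern (pattern : String) (schedule : String) (out : Bool) : Prop := out = schedule_pattern_alt pattern schedule
instance (pattern : String) (schedule : String) (out : Bool) : Decidable (Spec_schedule_pattern pattern schedule out) := by unfold Spec_schedule_pattern; infer_instance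

-- ===== CLAIM (what is proved, stated in full; the proofs are below) =====
def Claim_equal_schedule_pattern : Prop := ∀ (pattern : String) (schedule : String), Dom_schedule_pattern pattern schedule → Spec_schedule_pattern pattern schedule (schedule_pattern pattern schedule)

-- ===== LEMMAS AND PROOFS =====

-- pairwise consistency of a pairing: no char maps to two different genres
def PairConsistent (zs : List (Char × String)) : Prop :=
  ∀ p ∈ zs, ∀ q ∈ zs, p.1 = q.1 → p.2 = q.2

-- A's loop returns true iff the remaining pairs are consistent with the dict built so far
-- and consistent among themselves
lemma loopA_iff (zs : List (Char × String)) (d : PySem.Dict Char String) :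
    schedulePatternLoopA d zs = true ↔
      (∀ p ∈ zs, ∀ v, d.get? p.1 = some v → p.2 = v) ∧ PairConsistent zs := by
  induction zs generalizing d with
  | nil => simp [schedulePatternLoopA, PairConsistent]
  | cons hd rest ih =>
    obtain ⟨c, g⟩ := hd
    rw [schedulePatternLoopA]
    by_cases hc : d.contains c = true
    · obtain ⟨v, hv⟩ : ∃ v, d.get? c = some v := by
        have := PySem.Dict.contains_eq_isSome_get? (d := d) (k := c)
        rw [hc] at this
        exact Option.isSome_iff_exists.mp this.symm
      rw [hc, if_pos rfl]
      by_cases hvg : v = g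
      · subst hvg
        have hgd : d.getD c "" = v := by rw [PySem.Dict.getD_eq_get?_getD, hv]; rfl
        rw [hgd, if_neg (by simp)]
        rw [ih]
        constructor
        · rintro ⟨h1, h2⟩
          refine ⟨?_, ?_⟩
          · rintro p hp w hw
            rcases List.mem_cons.mp hp with h | h
            · subst h; simp_all
            · exact h1 p h w hw
          · rintro p hp q hq hpq
            rcases List.mem_cons.mp hp with h | h <;> rcases List.mem_cons.mp hq with h' | h'
            · subst h; subst h'; rfl
            · subst h
              have := h1 q h' v (by rw [← hpq]; exact hv)
              simpa using this.symm
            · subst h'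
              exact h1 p h v (by rw [hpq]; exact hv)
            · exact h2 p h q h' hpq
        · rintro ⟨h1, h2⟩
          exact ⟨fun p hp => h1 p (List.mem_cons_of_mem _ hp),
                 fun p hp q hq => h2 p (List.mem_cons_of_mem _ hp) q (List.mem_cons_of_mem _ hq)⟩
      · have hgd : d.getD c "" = v := by rw [PySem.Dict.getD_eq_get?_getD, hv]; rfl
        rw [hgd, if_pos (by simpa using hvg)]
        constructor
        · intro h; exact absurd h (by simp)
        · rintro ⟨h1, _⟩
          exact absurd (h1 (c, g) (List.mem_cons_self) v hv).symm hvg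
    · have hcn : d.get? c = none := by
        have := PySem.Dict.contains_eq_isSome_get? (d := d) (k := c)
        rw [Bool.not_eq_true] at hc
        rw [hc] at this
        exact Option.not_isSome_iff_eq_none.mp (by rw [← this]; simp)
      rw [Bool.not_eq_true] at hc
      rw [hc]
      simp only [if_false, Bool.false_eq_true]
      rw [ih]
      constructor
      · rintro ⟨h1, h2⟩
        refine ⟨?_, ?_⟩
        · rintro p hp w hw
          rcases List.mem_cons.mp hp with h | h
          · subst h; rw [hcn] at hw; cases hw
          · by_cases hpc : p.1 = c
            · rw [hpc, hcn] at hw; cases hw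
            · exact h1 p h w (by rw [PySem.Dict.get?_insert, if_neg hpc]; exact hw)
        · rintro p hp q hq hpq
          rcases List.mem_cons.mp hp with h | h <;> rcases List.mem_cons.mp hq with h' | h'
          · subst h; subst h'; rfl
          · subst h
            have := h1 q h' g (by rw [PySem.Dict.get?_insert, if_pos (by rw [← hpq])])
            exact this.symm
          · subst h'
            exact h1 p h g (by rw [PySem.Dict.get?_insert, if_pos hpq])
          · exact h2 p h q h' hpq
      · rintro ⟨h1, h2⟩
        refine ⟨?_, fun p hp q hq => h2 p (List.mem_cons_of_mem _ hp) q (List.mem_cons_of_mem _ hq)⟩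
        rintro p hp w hw
        rw [PySem.Dict.get?_insert] at hw
        by_cases hpc : p.1 = c
        · rw [if_pos hpc] at hw
          cases hw
          exact h2 p (List.mem_cons_of_mem _ hp) (c, g) (List.mem_cons_self) hpc
        · rw [if_neg hpc] at hw
          exact h1 p (List.mem_cons_of_mem _ hp) w hw

-- B's nested all-scan is exactly pairwise consistency
lemma allscan_iff (zs : List (Char × String)) :
    (zs.all (fun p => zs.all (fun q => p.1 != q.1 || p.2 == q.2))) = true ↔
      PairConsistent zs := by
  simp only [List.all_eq_true, Bool.or_eq_true, bne_iff_ne, beq_iff_eq, PairConsistent]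
  constructor
  · intro h p hp q hq hpq
    rcases h p hp q hq with h' | h'
    · exact absurd hpq h'
    · exact h'
  · intro h p hp q hq
    by_cases hpq : p.1 = q.1
    · exact Or.inr (h p hp q hq hpq)
    · exact Or.inl hpq

lemma loop_eq_allscan (zs : List (Char × String)) :
    schedulePatternLoopA PySem.Dict.empty zs =
      zs.all (fun p => zs.all (fun q => p.1 != q.1 || p.2 == q.2)) := by
  by_cases hc : PairConsistent zs
  · rw [(allscan_iff zs).mpr hc]
    rw [loopA_iff]
    refine ⟨?_, hc⟩
    intro p _ v hv
    rw [PySem.Dict.get?_empty] at hv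
    cases hv
  · have h1 : schedulePatternLoopA PySem.Dict.empty zs = false := by
      rw [Bool.eq_false_iff]
      intro h
      exact hc ((loopA_iff zs PySem.Dict.empty).mp h).2
    have h2 : (zs.all (fun p => zs.all (fun q => p.1 != q.1 || p.2 == q.2))) = false := by
      rw [Bool.eq_false_iff]
      intro h
      exact hc ((allscan_iff zs).mp h)
    rw [h1, h2]

-- ===== VERDICT (by name: the statement is the Claim_ definition above) =====
theorem schedule_pattern_spec : Claim_equal_schedule_pattern := by
  intro pattern schedule _
  unfold Spec_schedule_pattern schedule_pattern schedule_pattern_alt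
  by_cases h : PySem.Str.len schedule ≠ PySem.Str.len pattern
  · rw [if_pos h, if_pos h]
  · rw [if_neg h, if_neg h]
    exact loop_eq_allscan _
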